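-- pv_equiv track=rewrite | github.com/vansh-31/LeetCode | 1st_Streak/Day167.py | numOfWays
-- ===== SOURCE A (Python) =====
-- from math import comb
--
-- def numOfWays(nums: list[int]) -> int:
--     def f(nums):
--         if len(nums) <= 2:
--             return 1
--         left = [v for v in nums if v < nums[0]]
--         right = [v for v in nums if v > nums[0]]
--         return comb(len(left) + len(right), len(right)) * f(left) * f(right)
--     return (f(nums) - 1) % (10**9 + 7)
-- ===== SOURCE B (Python) =====
-- from math import comb
--
-- MOD = 10**9 + 7
--
-- # Counting BST: node = (left, value, count, right); duplicates of a value collapse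
-- # into the node's count, exactly as A's strict filters drop pivot-duplicates.
-- def _insert(t, x):
--     if t is None:
--         return (None, x, 1, None)
--     l, v, c, r = t
--     if x < v:
--         return (_insert(l, x), v, c, r)
--     if x > v:
--         return (l, v, c, _insert(r, x))
--     return (l, v, c + 1, r)
--
-- def _walk(t):
--     # returns (subtree size counting multiplicities, number of orderings mod MOD)
--     if t is None:
--         return (0, 1)
--     l, v, c, r = t
--     sl, wl = _walk(l)
--     sr, wr = _walk(r)
--     return (sl + c + sr, comb(sl + sr, sr) * wl % MOD * wr % MOD)
--
-- def numOfWays(nums: list[int]) -> int: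
--     t = None
--     for x in nums:
--         t = _insert(t, x)
--     return (_walk(t)[1] - 1) % MOD
-- ===== Notes on version B (the rewrite author's own statement) =====
-- stated objective: alternative
-- what changed: Replaces A's repeated list-filtering recursion by building a counting BST once via per-element insertion (duplicates collapse into a node counter) and then one traversal that combines subtree sizes with binomials, keeping the product reduced mod 10^9+7.
import Mathlib
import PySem

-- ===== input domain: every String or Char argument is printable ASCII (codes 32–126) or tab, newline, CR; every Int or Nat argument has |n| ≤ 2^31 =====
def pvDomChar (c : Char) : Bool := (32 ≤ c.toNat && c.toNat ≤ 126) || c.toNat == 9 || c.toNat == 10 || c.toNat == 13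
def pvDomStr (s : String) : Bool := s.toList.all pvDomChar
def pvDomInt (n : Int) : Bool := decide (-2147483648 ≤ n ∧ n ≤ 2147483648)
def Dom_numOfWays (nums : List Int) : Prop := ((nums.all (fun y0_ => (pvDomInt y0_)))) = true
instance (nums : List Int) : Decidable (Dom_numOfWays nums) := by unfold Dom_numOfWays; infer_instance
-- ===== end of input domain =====

-- B replaces A's repeated-filtering recursion by building a counting BST once
-- (duplicates collapse into a node counter) and one traversal combining subtree
-- sizes with binomials, the product reduced mod 10^9+7 (objective: alternative).

-- ===== PORT A =====
-- termination helpers (cited by the port's decreasing_by): the two filtered sublists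
-- together are strictly shorter than the list they were filtered from
theorem pv_attach_len (p : Int → Bool) (l : List Int) :
    (l.attach.filter (fun x => p x.1)).length = (l.filter p).length := by
  rw [← List.countP_eq_length_filter, ← List.countP_eq_length_filter, List.countP_attach]

theorem pvA1u (a : Int) (l : List Int) :
    ((l.attach.filter (fun x => decide (x.1 < a))).unattach).length = (l.filter (fun v => decide (v < a))).length := by
  rw [List.length_unattach]; exact pv_attach_len (fun v => decide (v < a)) l

theorem pvA2u (a : Int) (l : List Int) :
    ((l.attach.filter (fun x => decide (a < x.1))).unattach).length = (l.filter (fun v => decide (a < v))).length := by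
  rw [List.length_unattach]; exact pv_attach_len (fun v => decide (a < v)) l

theorem pv_two_filters (a : Int) (t : List Int) :
    (t.filter (fun v => decide (v < a))).length + (t.filter (fun v => decide (a < v))).length ≤ t.length := by
  induction t with
  | nil => simp
  | cons b t ih =>
    rcases lt_trichotomy b a with h | h | h
    · simp [h, not_lt.2 h.le]; omega
    · subst h; simp; omega
    · simp [h, not_lt.2 h.le]; omega

theorem pv_split_sum (cur : List Int) (hne : cur ≠ []) :
    (cur.filter (fun v => decide (v < cur.headI))).length +
      (cur.filter (fun v => decide (cur.headI < v))).length < cur.length := by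
  cases cur with
  | nil => exact absurd rfl hne
  | cons a t =>
    have h := pv_two_filters a t
    simp only [List.headI, List.filter_cons, lt_self_iff_false, decide_false,
      Bool.false_eq_true, if_false, List.length_cons]
    exact Nat.lt_succ_of_le h

-- A's inner f: len ≤ 2 → 1, else comb(l+r, r) * f(left) * f(right); nums[0] = headI (nonempty there)
def pyF (nums : List Int) : Int :=
  if nums.length ≤ 2 then 1
  else
    let left := nums.filter (fun v => decide (v < nums.headI))
    let right := nums.filter (fun v => decide (nums.headI < v))
    (((left.length + right.length).choose right.length : Nat) : Int) * pyF left * pyF right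
termination_by nums.length
decreasing_by
  all_goals
    have hne : nums ≠ [] := by rintro rfl; simp_all
    have := pv_split_sum nums hne
    simp only [pvA1u, pvA2u]
    omega

def numOfWays (nums : List Int) : Int :=
  PySem.Int.mod (pyF nums - 1) (10 ^ 9 + 7)

-- ===== PORT B =====
-- counting BST node: left subtree, value, multiplicity, right subtree
inductive BT : Type
  | leaf : BT
  | node : BT → Int → Nat → BT → BT
deriving DecidableEq, Repr

-- Source B's _insert
def bInsert : BT → Int → BT
  | .leaf, x => .node .leaf x 1 .leaf
  | .node l v c r, x =>
    if x < v then .node (bInsert l x) v c r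
    else if v < x then .node l v c (bInsert r x)
    else .node l v (c + 1) r

-- Source B's _walk: (subtree size with multiplicities, orderings mod 10^9+7)
def bWalk : BT → Nat × Int
  | .leaf => (0, 1)
  | .node l _ c r =>
    let (sl, wl) := bWalk l
    let (sr, wr) := bWalk r
    (sl + c + sr,
     PySem.Int.mod (PySem.Int.mod ((((sl + sr).choose sr : Nat) : Int) * wl) 1000000007 * wr)
       1000000007)

def numOfWays_alt (nums : List Int) : Int :=
  PySem.Int.mod ((bWalk (nums.foldl bInsert .leaf)).2 - 1) 1000000007

-- ===== PRECONDITION & SPEC =====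
def Spec_numOfWays (nums : List Int) (out : Int) : Prop := out = numOfWays_alt nums
instance (nums : List Int) (out : Int) : Decidable (Spec_numOfWays nums out) := by unfold Spec_numOfWays; infer_instance

-- ===== CLAIM (what is proved, stated in full; the proofs are below) =====
def Claim_equal_numOfWays : Prop := ∀ (nums : List Int), Dom_numOfWays nums → Spec_numOfWays nums (numOfWays nums)

-- ===== LEMMAS AND PROOFS =====
-- proof-side characterisation of the tree: its size and the exact (unreduced) product
def bSize : BT → Nat
  | .leaf => 0
  | .node l _ c r => bSize l + c + bSize r

def bProd : BT → Int
  | .leaf => 1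
  | .node l _ _ r => (((bSize l + bSize r).choose (bSize r) : Nat) : Int) * bProd l * bProd r

theorem bSize_insert (t : BT) (x : Int) : bSize (bInsert t x) = bSize t + 1 := by
  induction t with
  | leaf => simp [bInsert, bSize]
  | node l v c r ihl ihr =>
    by_cases h1 : x < v
    · simp [bInsert, h1, bSize, ihl]; omega
    · by_cases h2 : v < x
      · simp [bInsert, h1, h2, bSize, ihr]; omega
      · simp [bInsert, h1, h2, bSize]; omega

theorem bSize_foldl (xs : List Int) : ∀ t, bSize (xs.foldl bInsert t) = bSize t + xs.length := by
  induction xs with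
  | nil => simp
  | cons x xs ih =>
    intro t
    simp only [List.foldl_cons, ih, bSize_insert, List.length_cons]
    omega

-- inserting a list into a node routes each element to the matching side (equals collapse)
theorem foldl_insert_node (xs : List Int) :
    ∀ (l : BT) (v : Int) (c : Nat) (r : BT),
    xs.foldl bInsert (.node l v c r) =
      .node ((xs.filter (fun a => decide (a < v))).foldl bInsert l) v
        (c + xs.countP (fun a => decide (a = v)))
        ((xs.filter (fun a => decide (v < a))).foldl bInsert r) := by
  induction xs with
  | nil => intro l v c r; simp
  | cons x xs ih =>
    intro l v c r
    rcases lt_trichotomy x v with h | h | h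
    · simp only [List.foldl_cons, bInsert, if_pos h, List.filter_cons,
        decide_eq_true h, if_pos, List.countP_cons, ih]
      have hne : ¬ (x = v) := ne_of_lt h
      have hng : ¬ (v < x) := not_lt.2 h.le
      simp [hne, hng]
    · subst h
      simp only [List.foldl_cons, bInsert, lt_self_iff_false, if_false, ih,
        List.filter_cons, List.countP_cons]
      simp; omega
    · have hne : ¬ (x = v) := (ne_of_lt h).symm
      have hng : ¬ (x < v) := not_lt.2 h.le
      simp only [List.foldl_cons, bInsert, if_neg hng, if_pos h, ih,
        List.filter_cons, List.countP_cons]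
      simp [hne, hng, h]

-- the exact product over the BST equals A's inner f
theorem pyF_eq_bProd_aux : ∀ (n : Nat) (nums : List Int), nums.length ≤ n →
    pyF nums = bProd (nums.foldl bInsert .leaf) := by
  intro n
  induction n with
  | zero =>
    intro nums h
    have : nums = [] := List.length_eq_zero_iff.mp (Nat.le_zero.mp h)
    subst this; simp [pyF, bProd]
  | succ n ih =>
    intro nums h
    cases nums with
    | nil => simp [pyF, bProd]
    | cons a xs =>
      have hbuild : (a :: xs).foldl bInsert .leaf =
          .node ((xs.filter (fun v => decide (v < a))).foldl bInsert .leaf) a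
            (1 + xs.countP (fun v => decide (v = a)))
            ((xs.filter (fun v => decide (a < v))).foldl bInsert .leaf) := by
        simpa [bInsert] using foldl_insert_node xs BT.leaf a 1 BT.leaf
      by_cases hlen : (a :: xs).length ≤ 2
      · -- short lists: both sides are 1
        rw [pyF]; rw [if_pos hlen, hbuild]
        match xs, hlen with
        | [], _ => simp [bProd, bSize]
        | [b], _ =>
          rcases lt_trichotomy b a with hb | hb | hb
          · have : ¬ (a < b) := not_lt.2 hb.le
            simp [hb, this, bProd, bSize, bInsert]
          · subst hb; simp [bProd, bSize]
          · have : ¬ (b < a) := not_lt.2 hb.le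
            simp [hb, this, bProd, bSize, bInsert]
      · rw [pyF]; rw [if_neg hlen, hbuild]
        have hhead : (a :: xs).headI = a := rfl
        have hfl : (a :: xs).filter (fun v => decide (v < (a :: xs).headI)) =
            xs.filter (fun v => decide (v < a)) := by
          simp [hhead]
        have hfr : (a :: xs).filter (fun v => decide ((a :: xs).headI < v)) =
            xs.filter (fun v => decide (a < v)) := by
          simp [hhead]
        have hlx : xs.length ≤ n := by simp at h; omega
        have ihl := ih (xs.filter (fun v => decide (v < a)))
          (le_trans (List.length_filter_le _ _) hlx)
        have ihr := ih (xs.filter (fun v => decide (a < v)))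
          (le_trans (List.length_filter_le _ _) hlx)
        simp only [hfl, hfr, bProd, bSize_foldl, ihl, ihr]
        simp [bSize]

theorem pv3 (a b c M : Int) :
    (a * (b % M)) % M * (c % M) % M = a * b * c % M := by
  have h1 : (a * (b % M)) % M = a * b % M := by
    rw [Int.mul_emod, Int.emod_emod_of_dvd _ dvd_rfl, ← Int.mul_emod]
  rw [h1]
  exact (Int.mul_emod (a * b) c M).symm

-- the traversal returns the size and the product reduced mod 10^9+7
theorem bWalk_eq (t : BT) : bWalk t = (bSize t, bProd t % 1000000007) := by
  induction t with
  | leaf => simp [bWalk, bSize, bProd]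
  | node l v c r ihl ihr =>
    simp only [bWalk, ihl, ihr, bSize, bProd, Prod.mk.injEq]
    refine ⟨trivial, ?_⟩
    rw [PySem.Int.mod_eq_emod_of_pos (by norm_num),
      PySem.Int.mod_eq_emod_of_pos (by norm_num)]
    exact pv3 _ _ _ _

-- ===== VERDICT (by name: the statement is the Claim_ definition above) =====
theorem numOfWays_spec : Claim_equal_numOfWays := by
  unfold Claim_equal_numOfWays Spec_numOfWays
  intro nums _
  unfold numOfWays numOfWays_alt
  have hp : ((10 : Int) ^ 9 + 7) = 1000000007 := by norm_num
  rw [hp, PySem.Int.mod_eq_emod_of_pos (by norm_num),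
      PySem.Int.mod_eq_emod_of_pos (by norm_num)]
  rw [bWalk_eq, pyF_eq_bProd_aux nums.length nums le_rfl]
  rw [Int.sub_emod (bProd _) 1, Int.sub_emod (bProd _ % 1000000007) 1,
    Int.emod_emod_of_dvd _ dvd_rfl]
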